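-- pv_equiv track=rewrite | github.com/pguz/Advent-of-Code-2021 | solutions/day_11.py | find_all_octopuses_flash_step
-- ===== SOURCE A (Python) =====
-- def find_all_octopuses_flash_step(energy_levels):
--     h = len(energy_levels)
--     w = len(energy_levels[0])
--     step = 0
--
--     def _add_energy(_h, _w):
--         if _w < 0 or _w >= w:
--             return
--         if _h < 0 or _h >= h:
--             return
--         if energy_levels[_h][_w] == 0:
--             return
--         energy_levels[_h][_w] += 1
--         if energy_levels[_h][_w] >= 10:
--             return True
--         else:
--             return False
--
--     flashes = set()
--     while any(energy_levels[i][j] != 0 for i in range(h) for j in range(w)):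
--         for i in range(h):
--             for j in range(w):
--                 energy_levels[i][j] += 1
--                 if energy_levels[i][j] >= 10:
--                     flashes.add((i, j))
--
--         while flashes:
--             i, j = flashes.pop()
--             energy_levels[i][j] = 0
--             for _i, _j in [
--                 (i - 1, j),
--                 (i - 1, j + 1),
--                 (i, j + 1),
--                 (i + 1, j + 1),
--                 (i + 1, j),
--                 (i + 1, j - 1),
--                 (i, j - 1),
--                 (i - 1, j - 1),
--             ]:
--                 if _add_energy(_i, _j) is True:
--                     flashes.add((_i, _j))
--         step += 1
--
--     return step
-- ===== SOURCE B (Python) =====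
-- def find_all_octopuses_flash_step(energy_levels):
--     h = len(energy_levels)
--     w = len(energy_levels[0])
--     step = 0
--     while any(energy_levels[i][j] != 0 for i in range(h) for j in range(w)):
--         for i in range(h):
--             for j in range(w):
--                 energy_levels[i][j] += 1
--         while True:
--             hot = next(((i, j) for i in range(h) for j in range(w)
--                         if energy_levels[i][j] >= 10), None)
--             if hot is None:
--                 break
--             i, j = hot
--             energy_levels[i][j] = 0
--             for ni, nj in [
--                 (i - 1, j),
--                 (i - 1, j + 1),
--                 (i, j + 1),
--                 (i + 1, j + 1),
--                 (i + 1, j),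
--                 (i + 1, j - 1),
--                 (i, j - 1),
--                 (i - 1, j - 1),
--             ]:
--                 if 0 <= ni < h and 0 <= nj < w and energy_levels[ni][nj] != 0:
--                     energy_levels[ni][nj] += 1
--         step += 1
--     return step
-- ===== Notes on version B (the rewrite author's own statement) =====
-- stated objective: simpler
-- what changed: Replaces A's pending-set worklist (the `flashes` set, `set.pop`, and the `_add_energy` helper that reports new flashers back into the set) by a plain fixpoint with no auxiliary data structure: repeatedly rescan the grid for the first cell >= 10, zero it and feed its neighbours, until a scan finds none; correctness rests on the flash order being immaterial (abelian property), which the Lean proof establishes.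
import Mathlib
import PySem

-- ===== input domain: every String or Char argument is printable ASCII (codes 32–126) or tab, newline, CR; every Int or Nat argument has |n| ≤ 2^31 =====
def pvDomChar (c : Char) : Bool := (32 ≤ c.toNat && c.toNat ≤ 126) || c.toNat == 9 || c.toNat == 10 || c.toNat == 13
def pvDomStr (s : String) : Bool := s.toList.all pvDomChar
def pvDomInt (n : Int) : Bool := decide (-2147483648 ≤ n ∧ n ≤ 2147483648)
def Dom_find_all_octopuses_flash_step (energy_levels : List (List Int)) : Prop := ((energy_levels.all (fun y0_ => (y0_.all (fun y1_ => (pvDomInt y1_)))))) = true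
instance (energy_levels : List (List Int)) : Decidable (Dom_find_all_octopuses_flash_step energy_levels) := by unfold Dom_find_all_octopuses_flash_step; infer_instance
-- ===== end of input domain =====

-- B replaces A's pending-set worklist by a plain find-first-and-flash fixpoint (objective: simpler);
-- both versions mutate the argument grid in place in Python — the equivalence proved here is about the
-- RETURN value (the step count; the final grid contents happen to agree as well but are not claimed).
-- Python's outer `while` genuinely loops forever on grids that never synchronise (e.g. [[0, 5]]); both
-- ports carry the same input-derived fuel on that loop as a totality guard and agree step for step.

-- ===== PORT A =====
-- shared grid primitives (used by both transliterations): guarded 2-D read/write, the row-major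
-- position list, the 8-neighbour offsets in A's order, the all-zero test, the outer-loop fuel guard
def ogGet (g : List (List Int)) (p : Int × Int) : Int :=
  if 0 ≤ p.1 ∧ 0 ≤ p.2 then (g.getD p.1.toNat []).getD p.2.toNat 0 else 0

def ogSet (g : List (List Int)) (p : Int × Int) (v : Int) : List (List Int) :=
  if 0 ≤ p.1 ∧ 0 ≤ p.2 then g.set p.1.toNat ((g.getD p.1.toNat []).set p.2.toNat v) else g

def ogInB (h w : Nat) (p : Int × Int) : Bool :=
  decide (0 ≤ p.1) && decide (p.1 < (h : Int)) && decide (0 ≤ p.2) && decide (p.2 < (w : Int))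

def ogPos (h w : Nat) : List (Int × Int) :=
  (List.range h).flatMap (fun i => (List.range w).map (fun j => (Int.ofNat i, Int.ofNat j)))

def ogNbrs (p : Int × Int) : List (Int × Int) :=
  [(p.1 - 1, p.2), (p.1 - 1, p.2 + 1), (p.1, p.2 + 1), (p.1 + 1, p.2 + 1),
   (p.1 + 1, p.2), (p.1 + 1, p.2 - 1), (p.1, p.2 - 1), (p.1 - 1, p.2 - 1)]

def ogAny (h w : Nat) (g : List (List Int)) : Bool :=
  (ogPos h w).any (fun p => ogGet g p != 0)

def ogMeas (h w : Nat) (g : List (List Int)) : Nat :=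
  ((ogPos h w).map (fun p => if ogGet g p = 0 then 0 else 1)).sum

def ogFuel (h w : Nat) (g : List (List Int)) : Nat :=
  200000 + 100 * h * w + ((ogPos h w).map (fun p => (-(ogGet g p)).toNat)).sum

-- A: `flashes.add` (set semantics on the pending list)
def ogAdd (P : List (Int × Int)) (q : Int × Int) : List (Int × Int) :=
  if q ∈ P then P else P ++ [q]

-- A: `_add_energy` — bounds checks, skip value-0 cells, increment, report whether the cell now flashes
def ogAddEnergy (h w : Nat) (g : List (List Int)) (q : Int × Int) : List (List Int) × Bool :=
  if ogInB h w q = false then (g, false)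
  else if ogGet g q = 0 then (g, false)
  else (ogSet g q (ogGet g q + 1), decide (10 ≤ ogGet g q + 1))

-- A: one pop of the pending set — zero the cell, feed its 8 neighbours, collect new flashers
def ogPopFlash (h w : Nat) (g : List (List Int)) (p : Int × Int) (P : List (Int × Int)) :
    List (List Int) × List (Int × Int) :=
  (ogNbrs p).foldl
    (fun st q =>
      let r := ogAddEnergy h w st.1 q
      (r.1, if r.2 then ogAdd st.2 q else st.2))
    (ogSet g p 0, P)

-- A: the `while flashes:` worklist loop (fuel only makes it total: each pop zeroes a ≥10 cell,
-- so the number of nonzero cells bounds the pops and the fuel passed below never runs out)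
def ogDrainA (h w : Nat) : Nat → List (List Int) → List (Int × Int) → List (List Int)
  | 0, g, _ => g
  | _ + 1, g, [] => g
  | f + 1, g, p :: P =>
    let st := ogPopFlash h w g p P
    ogDrainA h w f st.1 st.2

-- A: the increment double loop, collecting the initial flash set as it goes
def ogIncCollect (h w : Nat) (g : List (List Int)) : List (List Int) × List (Int × Int) :=
  (ogPos h w).foldl
    (fun st p =>
      let v := ogGet st.1 p + 1
      (ogSet st.1 p v, if 10 ≤ v then ogAdd st.2 p else st.2))
    (g, [])

-- A: the outer `while any(...)` loop (fuel = totality guard for genuinely non-synchronising grids)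
def ogRunA (h w : Nat) : Nat → List (List Int) → Int → Int
  | 0, _, step => step
  | f + 1, g, step =>
    if ogAny h w g then
      let ic := ogIncCollect h w g
      let g2 := ogDrainA h w (ogMeas h w ic.1 + 1) ic.1 ic.2
      ogRunA h w f g2 (step + 1)
    else step

def find_all_octopuses_flash_step (energy_levels : List (List Int)) : Int :=
  let h := energy_levels.length
  let w := (energy_levels.headD []).length
  ogRunA h w (ogFuel h w energy_levels) energy_levels 0

-- ===== PORT B =====
-- B: plain increment of every cell
def ogInc (h w : Nat) (g : List (List Int)) : List (List Int) :=
  (ogPos h w).foldl (fun gg p => ogSet gg p (ogGet gg p + 1)) g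

-- B: `next(...)` — first over-charged cell in row-major order
def ogFirstHot (h w : Nat) (g : List (List Int)) : Option (Int × Int) :=
  (ogPos h w).find? (fun p => decide (10 ≤ ogGet g p))

-- B: flash one cell — zero it, give +1 to each in-bounds nonzero neighbour
def ogFlash (h w : Nat) (g : List (List Int)) (p : Int × Int) : List (List Int) :=
  (ogNbrs p).foldl
    (fun gg q =>
      if ogInB h w q = true ∧ ogGet gg q ≠ 0 then ogSet gg q (ogGet gg q + 1) else gg)
    (ogSet g p 0)

-- B: the `while True: find a hot cell, flash it` fixpoint loop (fuel only makes it total: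
-- every flash zeroes a ≥10 cell, so the call below always carries enough)
def ogDrainB (h w : Nat) : Nat → List (List Int) → List (List Int)
  | 0, g => g
  | f + 1, g =>
    match ogFirstHot h w g with
    | none => g
    | some p => ogDrainB h w f (ogFlash h w g p)

-- B: the same outer `while any(...)` loop (same fuel guard as A's port)
def ogRunB (h w : Nat) : Nat → List (List Int) → Int → Int
  | 0, _, step => step
  | f + 1, g, step =>
    if ogAny h w g then
      let g1 := ogInc h w g
      let g2 := ogDrainB h w (ogMeas h w g1 + 1) g1
      ogRunB h w f g2 (step + 1)
    else step

def find_all_octopuses_flash_step_alt (energy_levels : List (List Int)) : Int :=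
  let h := energy_levels.length
  let w := (energy_levels.headD []).length
  ogRunB h w (ogFuel h w energy_levels) energy_levels 0

-- ===== PRECONDITION & SPEC =====
-- Pre_ excludes exactly the inputs on which A raises IndexError: the empty grid
-- (len(energy_levels[0]) fails) and grids where some row is shorter than the first row
-- (energy_levels[i][j] fails for j < w). Nothing else is excluded.
def Pre_find_all_octopuses_flash_step (energy_levels : List (List Int)) : Prop :=
  energy_levels ≠ [] ∧ ∀ r ∈ energy_levels, (energy_levels.headD []).length ≤ r.length

instance (energy_levels : List (List Int)) : Decidable (Pre_find_all_octopuses_flash_step energy_levels) := by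
  unfold Pre_find_all_octopuses_flash_step; infer_instance

def pvWitness_find_all_octopuses_flash_step : List (List Int) := [[1, 8], [3, 2]]

def Spec_find_all_octopuses_flash_step (energy_levels : List (List Int)) (out : Int) : Prop := out = find_all_octopuses_flash_step_alt energy_levels
instance (energy_levels : List (List Int)) (out : Int) : Decidable (Spec_find_all_octopuses_flash_step energy_levels out) := by unfold Spec_find_all_octopuses_flash_step; infer_instance

-- ===== CLAIM (what is proved, stated in full; the proofs are below) =====
def Claim_equal_find_all_octopuses_flash_step : Prop := ∀ (energy_levels : List (List Int)), Dom_find_all_octopuses_flash_step energy_levels → Pre_find_all_octopuses_flash_step energy_levels → Spec_find_all_octopuses_flash_step energy_levels (find_all_octopuses_flash_step energy_levels)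

-- ===== LEMMAS AND PROOFS =====

-- the shape invariant every grid of the run satisfies (h rows, each of length ≥ w)
def ogShp (h w : Nat) (g : List (List Int)) : Prop :=
  g.length = h ∧ ∀ r ∈ g, w ≤ r.length

-- `bumpv` - the pointwise effect of one neighbour feed
def ogBumpv (x : Int) : Int := if x = 0 then 0 else x + 1

theorem mem_ogAdd {P : List (Int × Int)} {x q : Int × Int} :
    q ∈ ogAdd P x ↔ q ∈ P ∨ q = x := by
  unfold ogAdd; split <;> simp_all [eq_comm]
  intro h; subst h; tauto

theorem nodup_ogAdd {P : List (Int × Int)} {x : Int × Int} (h : P.Nodup) :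
    (ogAdd P x).Nodup := by
  unfold ogAdd; split
  · exact h
  · refine List.Nodup.append h (List.nodup_singleton x) ?_
    intro a ha hb
    simp only [List.mem_singleton] at hb
    subst hb
    exact absurd ha (by assumption)

theorem mem_ogPos {h w : Nat} {p : Int × Int} :
    p ∈ ogPos h w ↔ ogInB h w p = true := by
  constructor
  · intro hmem
    rw [ogPos, List.mem_flatMap] at hmem
    obtain ⟨i, hi, hmem⟩ := hmem
    rw [List.mem_map] at hmem
    obtain ⟨j, hj, e⟩ := hmem
    rw [List.mem_range] at hi
    rw [List.mem_range] at hj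
    subst e
    simp only [ogInB, Bool.and_eq_true, decide_eq_true_eq]
    refine ⟨⟨⟨?_, ?_⟩, ?_⟩, ?_⟩ <;> simp [Int.ofNat_eq_natCast] <;> omega
  · intro hb
    simp only [ogInB, Bool.and_eq_true, decide_eq_true_eq] at hb
    obtain ⟨⟨⟨h1, h2⟩, h3⟩, h4⟩ := hb
    rw [ogPos, List.mem_flatMap]
    refine ⟨p.1.toNat, List.mem_range.mpr (by omega), ?_⟩
    rw [List.mem_map]
    refine ⟨p.2.toNat, List.mem_range.mpr (by omega), ?_⟩
    obtain ⟨a, b⟩ := p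
    simp only [Prod.mk.injEq, Int.ofNat_eq_natCast] at h1 h3 ⊢
    constructor <;> omega

theorem nodup_ogPos {h w : Nat} : (ogPos h w).Nodup := by
  unfold ogPos
  rw [List.nodup_flatMap]
  constructor
  · intro i _
    refine List.Nodup.map ?_ (List.nodup_range)
    intro a b hab
    simpa using hab
  · refine List.Pairwise.imp ?_ (List.pairwise_lt_range (n := h))
    intro a b hab
    intro x hx hy
    simp only [List.mem_map, List.mem_range] at hx hy
    obtain ⟨j1, _, e1⟩ := hx
    obtain ⟨j2, _, e2⟩ := hy
    rw [← e1] at e2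
    simp only [Prod.mk.injEq, Int.ofNat_eq_natCast] at e2
    obtain ⟨ea, eb⟩ := e2
    omega

theorem nodup_ogNbrs (p : Int × Int) : (ogNbrs p).Nodup := by
  simp [ogNbrs, Prod.ext_iff]
  omega

theorem not_mem_ogNbrs_self (p : Int × Int) : p ∉ ogNbrs p := by
  simp [ogNbrs, Prod.ext_iff]
  omega

theorem ogSet_profile (g : List (List Int)) (p : Int × Int) (v : Int) :
    (ogSet g p v).map List.length = g.map List.length := by
  unfold ogSet
  split
  · rw [List.map_set]
    by_cases hi : p.1.toNat < g.length
    · have : ((g.getD p.1.toNat []).set p.2.toNat v).length = (g.map List.length).getD p.1.toNat 0 := by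
        rw [List.length_set]
        rw [List.getD_eq_getElem?_getD, List.getD_eq_getElem?_getD, List.getElem?_map]
        cases hx : g[p.1.toNat]? <;> simp_all [List.getElem?_eq_getElem, hi]
      rw [this]
      rw [List.getD_eq_getElem?_getD, List.getElem?_eq_getElem (by simpa using hi)]
      simp only [Option.getD_some]
      exact List.set_getElem_self (by simpa using hi)
    · rw [List.set_eq_of_length_le (by simpa using Nat.le_of_not_lt hi)]
  · rfl

theorem ogShp_of_profile {h w : Nat} {g g' : List (List Int)}
    (hp : g'.map List.length = g.map List.length) (hs : ogShp h w g) : ogShp h w g' := by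
  obtain ⟨h1, h2⟩ := hs
  constructor
  · have := congrArg List.length hp
    simpa [h1] using this
  · intro r hr
    obtain ⟨i, hi, hget⟩ := List.mem_iff_getElem.mp hr
    have hlen : (g'.map List.length)[i]? = (g.map List.length)[i]? := by rw [hp]
    have hil : i < g.length := by
      have := congrArg List.length hp
      simp only [List.length_map] at this
      omega
    rw [List.getElem?_map, List.getElem?_map] at hlen
    rw [List.getElem?_eq_getElem hi, List.getElem?_eq_getElem hil] at hlen
    simp only [Option.map_some, Option.some.injEq] at hlen
    rw [hget] at hlen
    rw [hlen]
    exact h2 _ (List.getElem_mem hil)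

theorem ogGet_ogSet {h w : Nat} {g : List (List Int)} {p : Int × Int} (v : Int)
    (hs : ogShp h w g) (hp : ogInB h w p = true) (q : Int × Int) :
    ogGet (ogSet g p v) q = if q = p then v else ogGet g q := by
  obtain ⟨hlen, hrow⟩ := hs
  simp only [ogInB, Bool.and_eq_true, decide_eq_true_eq] at hp
  obtain ⟨⟨⟨hp1, hp2⟩, hp3⟩, hp4⟩ := hp
  have hpl : p.1.toNat < g.length := by omega
  have hmem : g.getD p.1.toNat [] ∈ g := by
    rw [List.getD_eq_getElem?_getD, List.getElem?_eq_getElem hpl]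
    exact List.getElem_mem hpl
  have hjl : p.2.toNat < (g.getD p.1.toNat []).length := by
    have := hrow _ hmem; omega
  have hset : ogSet g p v = g.set p.1.toNat ((g.getD p.1.toNat []).set p.2.toNat v) := by
    unfold ogSet; exact if_pos ⟨hp1, hp3⟩
  rw [hset]
  by_cases hqp : q = p
  · subst hqp
    rw [if_pos rfl]
    unfold ogGet
    rw [if_pos ⟨hp1, hp3⟩]
    rw [List.getD_eq_getElem?_getD (l := List.set _ _ _), List.getElem?_set_self (by simpa using hpl)]
    simp only [Option.getD_some]
    rw [List.getD_eq_getElem?_getD (l := List.set _ _ _), List.getElem?_set_self hjl]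
    rfl
  · rw [if_neg hqp]
    unfold ogGet
    by_cases hq : 0 ≤ q.1 ∧ 0 ≤ q.2
    · rw [if_pos hq, if_pos hq]
      by_cases hi : q.1.toNat = p.1.toNat
      · have hj2 : q.2 ≠ p.2 := fun hc => hqp (Prod.ext (by omega) hc)
        have hjn : p.2.toNat ≠ q.2.toNat := by omega
        rw [List.getD_eq_getElem?_getD (l := List.set _ _ _), hi,
          List.getElem?_set_self (by simpa using hpl)]
        simp only [Option.getD_some]
        rw [List.getD_eq_getElem?_getD (l := List.set _ _ _), List.getElem?_set_ne hjn]
        simp [List.getD_eq_getElem?_getD]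
      · rw [List.getD_eq_getElem?_getD (l := List.set _ _ _),
          List.getElem?_set_ne (fun hc => hi hc.symm)]
        simp [List.getD_eq_getElem?_getD]
    · rw [if_neg hq, if_neg hq]

-- ===== the bump fold (B's flash body; A's pop body has the same grid component) =====

theorem foldBump_profile (h w : Nat) (L : List (Int × Int)) (g0 : List (List Int)) :
    ((L.foldl (fun gg q =>
      if ogInB h w q = true ∧ ogGet gg q ≠ 0 then ogSet gg q (ogGet gg q + 1) else gg) g0).map List.length)
      = g0.map List.length := by
  induction L generalizing g0 with
  | nil => rfl
  | cons r L ih =>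
    simp only [List.foldl_cons]
    rw [ih]
    split
    · exact ogSet_profile ..
    · rfl

theorem foldBump_get {h w : Nat} {L : List (Int × Int)} (hL : L.Nodup)
    {g0 : List (List Int)} (hs : ogShp h w g0) (q : Int × Int) :
    ogGet (L.foldl (fun gg q =>
      if ogInB h w q = true ∧ ogGet gg q ≠ 0 then ogSet gg q (ogGet gg q + 1) else gg) g0) q
      = if q ∈ L ∧ ogInB h w q = true then ogBumpv (ogGet g0 q) else ogGet g0 q := by
  induction L generalizing g0 with
  | nil => simp
  | cons r L ih =>
    obtain ⟨hr, hL'⟩ := List.nodup_cons.mp hL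
    simp only [List.foldl_cons]
    set g1 := if ogInB h w r = true ∧ ogGet g0 r ≠ 0 then ogSet g0 r (ogGet g0 r + 1) else g0 with hg1
    have hprof : g1.map List.length = g0.map List.length := by
      rw [hg1]; split
      · exact ogSet_profile ..
      · rfl
    have hs1 : ogShp h w g1 := ogShp_of_profile hprof hs
    rw [ih hL' hs1]
    have hget : ∀ x : Int × Int, x ≠ r → ogGet g1 x = ogGet g0 x := by
      intro x hx
      rw [hg1]; split
      · rename_i hc; rw [ogGet_ogSet _ hs hc.1, if_neg hx]
      · rfl
    have hgr : ogGet g1 r = if ogInB h w r = true then ogBumpv (ogGet g0 r) else ogGet g0 r := by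
      rw [hg1]; unfold ogBumpv
      by_cases hb : ogInB h w r = true
      · by_cases h0 : ogGet g0 r = 0
        · rw [if_neg (by tauto), if_pos hb, if_pos h0, h0]
        · rw [if_pos ⟨hb, h0⟩, ogGet_ogSet _ hs hb, if_pos rfl, if_pos hb, if_neg h0]
      · rw [if_neg (by tauto), if_neg hb]
    by_cases hmem : q ∈ L
    · have hqr : q ≠ r := fun hc => hr (hc ▸ hmem)
      rw [hget q hqr]
      by_cases hb : ogInB h w q = true
      · rw [if_pos ⟨hmem, hb⟩, if_pos ⟨List.mem_cons_of_mem _ hmem, hb⟩]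
      · rw [if_neg (by tauto), if_neg (by tauto)]
    · by_cases hqr : q = r
      · subst hqr
        rw [if_neg (by tauto), hgr]
        by_cases hb : ogInB h w q = true
        · rw [if_pos hb, if_pos ⟨List.mem_cons_self, hb⟩]
        · rw [if_neg hb, if_neg (by tauto)]
      · rw [if_neg (by tauto), hget q hqr, if_neg (by simp [List.mem_cons]; tauto)]

theorem ogAddEnergy_fst (h w : Nat) (g : List (List Int)) (q : Int × Int) :
    (ogAddEnergy h w g q).1 =
      if ogInB h w q = true ∧ ogGet g q ≠ 0 then ogSet g q (ogGet g q + 1) else g := by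
  unfold ogAddEnergy
  cases hb : ogInB h w q
  · simp
  · by_cases h0 : ogGet g q = 0 <;> simp [h0]

theorem ogAddEnergy_snd (h w : Nat) (g : List (List Int)) (q : Int × Int) :
    ((ogAddEnergy h w g q).2 = true) ↔
      (ogInB h w q = true ∧ ogGet g q ≠ 0 ∧ 10 ≤ ogGet g q + 1) := by
  unfold ogAddEnergy
  cases hb : ogInB h w q
  · simp
  · by_cases h0 : ogGet g q = 0 <;> simp [h0]

theorem ogPopFlash_fst (h w : Nat) (g : List (List Int)) (p : Int × Int) (P : List (Int × Int)) :
    (ogPopFlash h w g p P).1 = ogFlash h w g p := by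
  unfold ogPopFlash ogFlash
  generalize ogNbrs p = L
  generalize ogSet g p 0 = g0
  induction L generalizing g0 P with
  | nil => rfl
  | cons r L ih =>
    simp only [List.foldl_cons]
    rw [ih]
    congr 1
    simp only [ogAddEnergy_fst]

theorem foldPop_snd_mem {h w : Nat} : ∀ {L : List (Int × Int)}, L.Nodup →
    ∀ {g0 : List (List Int)} {P0 : List (Int × Int)}, ogShp h w g0 → ∀ q : Int × Int,
    (q ∈ (L.foldl (fun st q =>
        let r := ogAddEnergy h w st.1 q
        (r.1, if r.2 then ogAdd st.2 q else st.2)) (g0, P0)).2 ↔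
      q ∈ P0 ∨ (q ∈ L ∧ ogInB h w q = true ∧ ogGet g0 q ≠ 0 ∧ 10 ≤ ogGet g0 q + 1)) := by
  intro L
  induction L with
  | nil => intro _ g0 P0 _ q; simp
  | cons r L ih =>
    intro hL g0 P0 hs q
    obtain ⟨hr, hL'⟩ := List.nodup_cons.mp hL
    simp only [List.foldl_cons]
    have hfst : (ogAddEnergy h w g0 r).1 =
        if ogInB h w r = true ∧ ogGet g0 r ≠ 0 then ogSet g0 r (ogGet g0 r + 1) else g0 :=
      ogAddEnergy_fst ..
    have hprof : ((ogAddEnergy h w g0 r).1).map List.length = g0.map List.length := by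
      rw [hfst]; split
      · exact ogSet_profile ..
      · rfl
    have hs1 : ogShp h w (ogAddEnergy h w g0 r).1 := ogShp_of_profile hprof hs
    rw [ih hL' hs1 q]
    have hget : ∀ x : Int × Int, x ≠ r → ogGet (ogAddEnergy h w g0 r).1 x = ogGet g0 x := by
      intro x hx
      rw [hfst]; split
      · rename_i hc; rw [ogGet_ogSet _ hs hc.1, if_neg hx]
      · rfl
    have hP1 : ∀ x : Int × Int,
        (x ∈ (if (ogAddEnergy h w g0 r).2 then ogAdd P0 r else P0) ↔
          x ∈ P0 ∨ (x = r ∧ ogInB h w r = true ∧ ogGet g0 r ≠ 0 ∧ 10 ≤ ogGet g0 r + 1)) := by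
      intro x
      by_cases hc : (ogAddEnergy h w g0 r).2 = true
      · rw [if_pos hc, mem_ogAdd]
        have := (ogAddEnergy_snd h w g0 r).mp hc
        tauto
      · rw [if_neg hc]
        have := fun hcc => hc ((ogAddEnergy_snd h w g0 r).mpr hcc)
        constructor
        · tauto
        · rintro (hx | ⟨hxr, hrest⟩)
          · exact hx
          · exact absurd hrest this
    rw [hP1 q]
    by_cases hqr : q = r
    · subst hqr
      have hqL : q ∉ L := hr
      simp only [List.mem_cons]
      tauto
    · rw [hget q hqr]
      simp only [List.mem_cons]
      tauto

theorem ogPopFlash_snd_mem {h w : Nat} {g : List (List Int)} {p : Int × Int}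
    {P : List (Int × Int)} (hs : ogShp h w g) (hp : ogInB h w p = true) (q : Int × Int) :
    (q ∈ (ogPopFlash h w g p P).2 ↔ q ∈ P ∨
      (q ∈ ogNbrs p ∧ ogInB h w q = true ∧ ogGet (ogSet g p 0) q ≠ 0 ∧ 10 ≤ ogGet (ogSet g p 0) q + 1)) := by
  unfold ogPopFlash
  exact foldPop_snd_mem (nodup_ogNbrs p)
    (ogShp_of_profile (ogSet_profile g p 0) hs) q

theorem ogPopFlash_snd_nodup {h w : Nat} {g : List (List Int)} {p : Int × Int}
    {P : List (Int × Int)} (hP : P.Nodup) : ((ogPopFlash h w g p P).2).Nodup := by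
  unfold ogPopFlash
  generalize ogSet g p 0 = g0
  generalize ogNbrs p = L
  induction L generalizing g0 P with
  | nil => exact hP
  | cons r L ih =>
    simp only [List.foldl_cons]
    apply ih
    split
    · exact nodup_ogAdd hP
    · exact hP

-- ===== flash: pointwise formula, shape/measure facts, commutation =====

theorem ogFlash_profile (h w : Nat) (g : List (List Int)) (p : Int × Int) :
    (ogFlash h w g p).map List.length = g.map List.length := by
  unfold ogFlash
  rw [foldBump_profile]
  exact ogSet_profile ..

theorem ogGet_ogFlash {h w : Nat} {g : List (List Int)} {p : Int × Int}
    (hs : ogShp h w g) (hp : ogInB h w p = true) (q : Int × Int) :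
    ogGet (ogFlash h w g p) q =
      if q = p then 0
      else if q ∈ ogNbrs p ∧ ogInB h w q = true then ogBumpv (ogGet g q) else ogGet g q := by
  unfold ogFlash
  rw [foldBump_get (nodup_ogNbrs p) (ogShp_of_profile (ogSet_profile g p 0) hs) q]
  rw [ogGet_ogSet _ hs hp q]
  by_cases hqp : q = p
  · subst hqp
    rw [if_pos rfl, if_pos rfl, if_neg (by simp [not_mem_ogNbrs_self])]
  · rw [if_neg hqp, if_neg hqp]

theorem og_ext {g1 g2 : List (List Int)}
    (hp : g1.map List.length = g2.map List.length)
    (hg : ∀ q : Int × Int, ogGet g1 q = ogGet g2 q) : g1 = g2 := by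
  have hlen : g1.length = g2.length := by
    have := congrArg List.length hp; simpa using this
  apply List.ext_getElem hlen
  intro i h1 h2
  have hrl : g1[i].length = g2[i].length := by
    have h1' : (g1.map List.length)[i]? = (g2.map List.length)[i]? := by rw [hp]
    rw [List.getElem?_map, List.getElem?_map, List.getElem?_eq_getElem h1,
      List.getElem?_eq_getElem h2] at h1'
    simpa using h1'
  apply List.ext_getElem hrl
  intro j hj1 hj2
  have := hg (Int.ofNat i, Int.ofNat j)
  simp only [ogGet, Int.ofNat_eq_natCast] at this
  rw [if_pos ⟨by positivity, by positivity⟩] at this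
  simp only [Int.toNat_natCast] at this
  rw [List.getD_eq_getElem?_getD (l := g1), List.getD_eq_getElem?_getD (l := g2),
    List.getElem?_eq_getElem h1, List.getElem?_eq_getElem h2] at this
  simp only [Option.getD_some] at this
  rw [List.getD_eq_getElem?_getD, List.getD_eq_getElem?_getD,
    List.getElem?_eq_getElem hj1, List.getElem?_eq_getElem hj2] at this
  simpa using this

theorem ogFlash_comm {h w : Nat} {g : List (List Int)} {p q : Int × Int}
    (hs : ogShp h w g) (hpq : p ≠ q)
    (hp : ogInB h w p = true) (hq : ogInB h w q = true) :
    ogFlash h w (ogFlash h w g p) q = ogFlash h w (ogFlash h w g q) p := by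
  have hs1 : ogShp h w (ogFlash h w g p) := ogShp_of_profile (ogFlash_profile ..) hs
  have hs2 : ogShp h w (ogFlash h w g q) := ogShp_of_profile (ogFlash_profile ..) hs
  apply og_ext
  · rw [ogFlash_profile, ogFlash_profile, ogFlash_profile, ogFlash_profile]
  · intro r
    rw [ogGet_ogFlash hs1 hq r, ogGet_ogFlash hs2 hp r]
    rw [ogGet_ogFlash hs hp r, ogGet_ogFlash hs hq r]
    by_cases hrp : r = p <;> by_cases hrq : r = q
    · exact absurd (hrp.symm.trans hrq) hpq
    · subst hrp
      rw [if_neg hrq, if_pos rfl, if_pos rfl]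
      split
      · simp [ogBumpv]
      · rfl
    · subst hrq
      rw [if_pos rfl, if_neg hrp, if_pos rfl]
      split
      · simp [ogBumpv]
      · rfl
    · rw [if_neg hrq, if_neg hrp, if_neg hrp, if_neg hrq]
      split_ifs <;> rfl

theorem ogFlash_avail {h w : Nat} {g : List (List Int)} {p q : Int × Int}
    (hs : ogShp h w g) (hp : ogInB h w p = true) (hne : q ≠ p)
    (hq : 10 ≤ ogGet g q) : 10 ≤ ogGet (ogFlash h w g p) q := by
  rw [ogGet_ogFlash hs hp q, if_neg hne]
  split
  · unfold ogBumpv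
    split <;> omega
  · exact hq

theorem ogMeas_ogFlash_lt {h w : Nat} {g : List (List Int)} {p : Int × Int}
    (hs : ogShp h w g) (hp : ogInB h w p = true) (hhot : 10 ≤ ogGet g p) :
    ogMeas h w (ogFlash h w g p) < ogMeas h w g := by
  unfold ogMeas
  apply List.sum_lt_sum
  · intro x hx
    rw [ogGet_ogFlash hs hp x]
    unfold ogBumpv
    split_ifs <;> omega
  · refine ⟨p, mem_ogPos.mpr hp, ?_⟩
    rw [ogGet_ogFlash hs hp p, if_pos rfl]
    rw [if_pos rfl, if_neg (by omega)]
    omega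

-- ===== drainB: canonical-fuel form, absorption of one flash =====

def ogDB (h w : Nat) (g : List (List Int)) : List (List Int) :=
  ogDrainB h w (ogMeas h w g + 1) g

theorem ogFirstHot_some {h w : Nat} {g : List (List Int)} {p : Int × Int}
    (h1 : ogFirstHot h w g = some p) : ogInB h w p = true ∧ 10 ≤ ogGet g p := by
  constructor
  · exact mem_ogPos.mp (List.mem_of_find?_eq_some h1)
  · simpa using List.find?_some h1

theorem ogFirstHot_isSome {h w : Nat} {g : List (List Int)} {p : Int × Int}
    (hp : ogInB h w p = true) (hhot : 10 ≤ ogGet g p) : (ogFirstHot h w g).isSome := by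
  exact List.find?_isSome.mpr ⟨p, mem_ogPos.mpr hp, by simpa⟩

theorem ogMeas_pos {h w : Nat} {g : List (List Int)} {p : Int × Int}
    (hp : ogInB h w p = true) (hhot : 10 ≤ ogGet g p) : 1 ≤ ogMeas h w g := by
  unfold ogMeas
  have hmem : (if ogGet g p = 0 then 0 else 1) ∈
      (ogPos h w).map (fun p => if ogGet g p = 0 then (0 : Nat) else 1) :=
    List.mem_map_of_mem (mem_ogPos.mpr hp)
  have := List.single_le_sum (by intro x hx; omega) _ hmem
  rw [if_neg (by omega)] at this
  omega

theorem ogDrainB_profile {h w : Nat} : ∀ (f : Nat) (g : List (List Int)), ogShp h w g →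
    (ogDrainB h w f g).map List.length = g.map List.length := by
  intro f
  induction f with
  | zero => intro g _; rfl
  | succ f ih =>
    intro g hs
    rcases heq : ogFirstHot h w g with _ | p
    · simp only [ogDrainB, heq]
    · simp only [ogDrainB, heq]
      rw [ih _ (ogShp_of_profile (ogFlash_profile ..) hs)]
      exact ogFlash_profile ..

theorem ogDrainB_fuel_aux {h w : Nat} : ∀ (f1 : Nat), ∀ (f2 : Nat) (g : List (List Int)), ogShp h w g →
    ogMeas h w g < f1 → ogMeas h w g < f2 → ogDrainB h w f1 g = ogDrainB h w f2 g := by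
  intro f1
  induction f1 with
  | zero => intro f2 g _ hm _; omega
  | succ f1 ih =>
    intro f2 g hs hm1 hm2
    obtain ⟨f2', rfl⟩ : ∃ f2', f2 = f2' + 1 := ⟨f2 - 1, by omega⟩
    rcases heq : ogFirstHot h w g with _ | p
    · simp only [ogDrainB, heq]
    · simp only [ogDrainB, heq]
      obtain ⟨hpB, hpHot⟩ := ogFirstHot_some heq
      have hlt := ogMeas_ogFlash_lt hs hpB hpHot
      exact ih f2' _ (ogShp_of_profile (ogFlash_profile ..) hs) (by omega) (by omega)

theorem ogDrainB_fuel {h w : Nat} : ∀ (f : Nat) (g : List (List Int)), ogShp h w g →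
    ogMeas h w g < f → ogDrainB h w f g = ogDB h w g := by
  intro f g hs hm
  exact ogDrainB_fuel_aux f (ogMeas h w g + 1) g hs hm (by omega)

theorem ogDB_absorb {h w : Nat} : ∀ (n : Nat) (g : List (List Int)), ogMeas h w g ≤ n →
    ogShp h w g → ∀ p : Int × Int, ogInB h w p = true → 10 ≤ ogGet g p →
    ogDB h w (ogFlash h w g p) = ogDB h w g := by
  intro n
  induction n with
  | zero =>
    intro g hm _ p hp hhot
    exact absurd (ogMeas_pos hp hhot) (by omega)
  | succ n ih =>
    intro g hm hs p hp hhot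
    obtain ⟨q, hq⟩ := Option.isSome_iff_exists.mp (ogFirstHot_isSome hp hhot)
    obtain ⟨hqB, hqHot⟩ := ogFirstHot_some hq
    have hsq : ogShp h w (ogFlash h w g q) := ogShp_of_profile (ogFlash_profile ..) hs
    have hltq := ogMeas_ogFlash_lt hs hqB hqHot
    have hDBg : ogDB h w g = ogDB h w (ogFlash h w g q) := by
      conv_lhs => unfold ogDB
      rw [show ogMeas h w g + 1 = ogMeas h w g + 1 from rfl]
      simp only [ogDrainB, hq]
      exact ogDrainB_fuel _ _ hsq (by omega)
    by_cases hpq : q = p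
    · subst hpq
      exact hDBg.symm
    · have hsp : ogShp h w (ogFlash h w g p) := ogShp_of_profile (ogFlash_profile ..) hs
      have hltp := ogMeas_ogFlash_lt hs hp hhot
      have h1 : ogDB h w (ogFlash h w (ogFlash h w g q) p) = ogDB h w (ogFlash h w g q) :=
        ih _ (by omega) hsq p hp (ogFlash_avail hs hqB (fun hc => hpq hc.symm) hhot)
      have h3 : ogDB h w (ogFlash h w (ogFlash h w g p) q) = ogDB h w (ogFlash h w g p) :=
        ih _ (by omega) hsp q hqB (ogFlash_avail hs hp hpq hqHot)
      calc ogDB h w (ogFlash h w g p)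
          = ogDB h w (ogFlash h w (ogFlash h w g p) q) := h3.symm
        _ = ogDB h w (ogFlash h w (ogFlash h w g q) p) := by
              rw [ogFlash_comm hs (fun hc => hpq hc.symm) hp hqB]
        _ = ogDB h w (ogFlash h w g q) := h1
        _ = ogDB h w g := hDBg.symm

-- ===== drainA = drainB via the worklist invariant =====

def ogInv (h w : Nat) (g : List (List Int)) (P : List (Int × Int)) : Prop :=
  P.Nodup ∧ ∀ q : Int × Int, q ∈ P ↔ (ogInB h w q = true ∧ 10 ≤ ogGet g q)

theorem ogDrainA_eq {h w : Nat} : ∀ (f : Nat) (g : List (List Int)) (P : List (Int × Int)),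
    ogShp h w g → ogInv h w g P → ogMeas h w g < f →
    ogDrainA h w f g P = ogDB h w g := by
  intro f
  induction f with
  | zero => intro g P _ _ hm; omega
  | succ f ih =>
    intro g P hs hinv hm
    obtain ⟨hnd, hmem⟩ := hinv
    cases P with
    | nil =>
      have hnone : ogFirstHot h w g = none := by
        apply List.find?_eq_none.mpr
        intro x hx
        simp only [decide_eq_true_eq]
        intro hcon
        exact absurd ((hmem x).mpr ⟨mem_ogPos.mp hx, hcon⟩) (List.not_mem_nil)
      show g = ogDB h w g
      unfold ogDB
      simp only [ogDrainB, hnone]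
    | cons p P' =>
      obtain ⟨hpB, hpHot⟩ := (hmem p).mp List.mem_cons_self
      obtain ⟨hpP', hnd'⟩ := List.nodup_cons.mp hnd
      have hfst := ogPopFlash_fst h w g p P'
      have hsp : ogShp h w (ogFlash h w g p) := ogShp_of_profile (ogFlash_profile ..) hs
      have hltp := ogMeas_ogFlash_lt hs hpB hpHot
      have hinv' : ogInv h w (ogFlash h w g p) (ogPopFlash h w g p P').2 := by
        refine ⟨ogPopFlash_snd_nodup hnd', ?_⟩
        intro q
        rw [ogPopFlash_snd_mem hs hpB q]
        rw [ogGet_ogSet _ hs hpB q, ogGet_ogFlash hs hpB q]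
        by_cases hqp : q = p
        · subst hqp
          rw [if_pos rfl, if_pos rfl]
          constructor
          · rintro (hq | ⟨_, _, hc, _⟩)
            · exact absurd hq hpP'
            · exact absurd rfl hc
          · rintro ⟨_, hc⟩; omega
        · rw [if_neg hqp, if_neg hqp]
          have hqP' : q ∈ P' ↔ (ogInB h w q = true ∧ 10 ≤ ogGet g q) := by
            rw [← hmem q]
            simp [List.mem_cons, hqp]
          rw [hqP']
          by_cases hnb : q ∈ ogNbrs p ∧ ogInB h w q = true
          · rw [if_pos hnb]
            unfold ogBumpv
            by_cases h0 : ogGet g q = 0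
            · rw [if_pos h0]
              constructor
              · rintro (⟨hb, h10⟩ | ⟨_, _, h0', _⟩)
                · omega
                · exact absurd h0 h0'
              · rintro ⟨_, h10⟩; omega
            · rw [if_neg h0]
              constructor
              · rintro (⟨hb, h10⟩ | ⟨_, hb, _, h9⟩)
                · exact ⟨hb, by omega⟩
                · exact ⟨hb, h9⟩
              · rintro ⟨hb, h9⟩
                exact Or.inr ⟨hnb.1, hb, h0, h9⟩
          · rw [if_neg hnb]
            constructor
            · rintro (hx | ⟨h1, h2, _, _⟩)
              · exact hx
              · exact absurd ⟨h1, h2⟩ hnb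
            · intro hx
              exact Or.inl hx
      have := ih (ogFlash h w g p) (ogPopFlash h w g p P').2 hsp (hfst ▸ hinv') (by omega)
      show ogDrainA h w f (ogPopFlash h w g p P').1 (ogPopFlash h w g p P').2 = ogDB h w g
      rw [hfst, this]
      exact ogDB_absorb (ogMeas h w g) g (by omega) hs p hpB hpHot

-- ===== the increment pass =====

theorem ogIncCollect_fst (h w : Nat) (g : List (List Int)) :
    (ogIncCollect h w g).1 = ogInc h w g := by
  unfold ogIncCollect ogInc
  generalize (ogPos h w) = L
  generalize hP : ([] : List (Int × Int)) = P0
  clear hP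
  induction L generalizing g P0 with
  | nil => rfl
  | cons r L ih =>
    simp only [List.foldl_cons]
    exact ih ..

theorem ogInc_profile (h w : Nat) (g : List (List Int)) :
    (ogInc h w g).map List.length = g.map List.length := by
  unfold ogInc
  generalize (ogPos h w) = L
  induction L generalizing g with
  | nil => rfl
  | cons r L ih =>
    simp only [List.foldl_cons]
    rw [ih]
    exact ogSet_profile ..

theorem foldInc_get {h w : Nat} : ∀ {L : List (Int × Int)}, L.Nodup →
    (∀ x ∈ L, ogInB h w x = true) →
    ∀ {g0 : List (List Int)}, ogShp h w g0 → ∀ q : Int × Int,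
    ogGet (L.foldl (fun gg p => ogSet gg p (ogGet gg p + 1)) g0) q =
      if q ∈ L then ogGet g0 q + 1 else ogGet g0 q := by
  intro L
  induction L with
  | nil => intro _ _ g0 _ q; simp
  | cons r L ih =>
    intro hL hB g0 hs q
    obtain ⟨hr, hL'⟩ := List.nodup_cons.mp hL
    have hrB : ogInB h w r = true := hB r List.mem_cons_self
    simp only [List.foldl_cons]
    have hs1 : ogShp h w (ogSet g0 r (ogGet g0 r + 1)) :=
      ogShp_of_profile (ogSet_profile ..) hs
    rw [ih hL' (fun x hx => hB x (List.mem_cons_of_mem _ hx)) hs1 q]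
    rw [ogGet_ogSet _ hs hrB q]
    by_cases hqr : q = r
    · subst hqr
      rw [if_pos rfl, if_neg hr, if_pos List.mem_cons_self]
    · rw [if_neg hqr]
      by_cases hqL : q ∈ L
      · rw [if_pos hqL, if_pos (List.mem_cons_of_mem _ hqL)]
      · rw [if_neg hqL, if_neg (by simp [List.mem_cons, hqr, hqL])]

theorem ogGet_ogInc {h w : Nat} {g : List (List Int)} (hs : ogShp h w g) (q : Int × Int) :
    ogGet (ogInc h w g) q = if ogInB h w q = true then ogGet g q + 1 else ogGet g q := by
  unfold ogInc
  rw [foldInc_get nodup_ogPos (fun x hx => mem_ogPos.mp hx) hs q]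
  by_cases hq : ogInB h w q = true
  · rw [if_pos (mem_ogPos.mpr hq), if_pos hq]
  · rw [if_neg (fun hc => hq (mem_ogPos.mp hc)), if_neg hq]

theorem foldIncCollect_snd {h w : Nat} : ∀ {L : List (Int × Int)}, L.Nodup →
    (∀ x ∈ L, ogInB h w x = true) →
    ∀ {g0 : List (List Int)} {P0 : List (Int × Int)}, ogShp h w g0 → ∀ q : Int × Int,
    (q ∈ (L.foldl (fun st p =>
        let v := ogGet st.1 p + 1
        (ogSet st.1 p v, if 10 ≤ v then ogAdd st.2 p else st.2)) (g0, P0)).2 ↔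
      q ∈ P0 ∨ (q ∈ L ∧ 10 ≤ ogGet g0 q + 1)) := by
  intro L
  induction L with
  | nil => intro _ _ g0 P0 _ q; simp
  | cons r L ih =>
    intro hL hB g0 P0 hs q
    obtain ⟨hr, hL'⟩ := List.nodup_cons.mp hL
    have hrB : ogInB h w r = true := hB r List.mem_cons_self
    simp only [List.foldl_cons]
    have hs1 : ogShp h w (ogSet g0 r (ogGet g0 r + 1)) :=
      ogShp_of_profile (ogSet_profile ..) hs
    rw [ih hL' (fun x hx => hB x (List.mem_cons_of_mem _ hx)) hs1 q]
    have hP1 : ∀ x : Int × Int,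
        (x ∈ (if 10 ≤ ogGet g0 r + 1 then ogAdd P0 r else P0) ↔
          x ∈ P0 ∨ (x = r ∧ 10 ≤ ogGet g0 r + 1)) := by
      intro x
      split
      · rw [mem_ogAdd]; rename_i hc; tauto
      · rename_i hc; tauto
    rw [hP1 q]
    by_cases hqr : q = r
    · subst hqr
      rw [ogGet_ogSet _ hs hrB q, if_pos rfl]
      simp only [List.mem_cons]
      constructor
      · rintro ((hx | ⟨_, hq2⟩) | ⟨hq1, _⟩)
        · exact Or.inl hx
        · exact Or.inr ⟨Or.inl trivial, hq2⟩
        · exact absurd hq1 hr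
      · rintro (hx | ⟨_, hq2⟩)
        · exact Or.inl (Or.inl hx)
        · exact Or.inl (Or.inr ⟨trivial, hq2⟩)
    · rw [ogGet_ogSet _ hs hrB q, if_neg hqr]
      simp only [List.mem_cons]
      tauto

theorem foldIncCollect_snd_nodup : ∀ (L : List (Int × Int))
    (g0 : List (List Int)) (P0 : List (Int × Int)), P0.Nodup →
    ((L.foldl (fun st p =>
        let v := ogGet st.1 p + 1
        (ogSet st.1 p v, if 10 ≤ v then ogAdd st.2 p else st.2)) (g0, P0)).2).Nodup := by
  intro L
  induction L with
  | nil => intro _ _ hP; exact hP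
  | cons r L ih =>
    intro g0 P0 hP
    simp only [List.foldl_cons]
    apply ih
    dsimp only
    split
    · exact nodup_ogAdd hP
    · exact hP

theorem ogIncCollect_inv {h w : Nat} {g : List (List Int)} (hs : ogShp h w g) :
    ogInv h w (ogInc h w g) (ogIncCollect h w g).2 := by
  constructor
  · exact foldIncCollect_snd_nodup _ _ _ List.nodup_nil
  · intro q
    unfold ogIncCollect
    rw [foldIncCollect_snd nodup_ogPos (fun x hx => mem_ogPos.mp hx) hs q]
    rw [ogGet_ogInc hs q]
    by_cases hq : ogInB h w q = true
    · rw [if_pos hq]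
      simp only [List.not_mem_nil, false_or, mem_ogPos]
    · rw [if_neg hq]
      simp only [List.not_mem_nil, false_or, mem_ogPos]
      tauto

-- ===== the outer loop =====

theorem ogRun_eq {h w : Nat} : ∀ (f : Nat) (g : List (List Int)) (s : Int), ogShp h w g →
    ogRunA h w f g s = ogRunB h w f g s := by
  intro f
  induction f with
  | zero => intro g s _; rfl
  | succ f ih =>
    intro g s hs
    simp only [ogRunA, ogRunB]
    split
    · have hfst := ogIncCollect_fst h w g
      have hsInc : ogShp h w (ogInc h w g) := ogShp_of_profile (ogInc_profile ..) hs
      have hInv := ogIncCollect_inv hs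
      have hA : ogDrainA h w (ogMeas h w (ogIncCollect h w g).1 + 1)
          (ogIncCollect h w g).1 (ogIncCollect h w g).2 = ogDB h w (ogInc h w g) := by
        rw [hfst]
        exact ogDrainA_eq _ _ _ hsInc hInv (by omega)
      rw [hA]
      show ogRunA h w f (ogDB h w (ogInc h w g)) (s + 1) =
        ogRunB h w f (ogDrainB h w (ogMeas h w (ogInc h w g) + 1) (ogInc h w g)) (s + 1)
      have hDB : ogDrainB h w (ogMeas h w (ogInc h w g) + 1) (ogInc h w g) =
          ogDB h w (ogInc h w g) := rfl
      rw [hDB]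
      apply ih
      exact ogShp_of_profile
        (by unfold ogDB; exact ogDrainB_profile _ _ hsInc) hsInc
    · rfl

-- ===== VERDICT (by name: the statement is the Claim_ definition above) =====
theorem find_all_octopuses_flash_step_spec : Claim_equal_find_all_octopuses_flash_step := by
  intro e _ hpre
  unfold Spec_find_all_octopuses_flash_step
  unfold find_all_octopuses_flash_step find_all_octopuses_flash_step_alt
  refine ogRun_eq _ _ _ ?_
  obtain ⟨hne, hrow⟩ := hpre
  refine ⟨rfl, ?_⟩
  intro r hr
  have := hrow r hr
  cases e with
  | nil => exact absurd rfl hne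
  | cons a t => simpa using this
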